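-- pv_equiv track=rewrite | github.com/Takkoyanagi/playground | shellSort.py | gap_insertion_sort
-- ===== SOURCE A (Python) =====
-- def gap_insertion_sort(array, start, gap):
--     for i in range(start+gap, len(array), gap):
--         current_val = array[i]
--         position = i
--
--         while position >= gap and array[position-gap] > current_val:
--             array[position] = array[position-gap]
--             position -= gap
--         array[position] = current_val
--     return array
-- ===== SOURCE B (Python) =====
-- def gap_insertion_sort(array, start, gap):
--     """Gather the stride-`gap` chain through index `start`, sort it with the
--     built-in sorted(), and scatter it back (in place, like the original)."""
--     if gap > 0:
--         idx = range(start % gap, len(array), gap)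
--         vals = sorted(array[j] for j in idx)
--         for j, v in zip(idx, vals):
--             array[j] = v
--     return array
-- ===== Notes on version B (the rewrite author's own statement) =====
-- stated objective: alternative
-- what changed: Replaces the in-place shifting insertion pass over the stride-gap chain by gather-the-chain / built-in sorted() / scatter-back.
-- intended difference: For gap > 0 and start >= gap, A assumes the chain entries at indices below start+gap are already sorted; when that prefix is unsorted A returns a still-unsorted chain, while B sorts the whole residue chain, the intended behaviour of a gapped sorting pass. — e.g. on gap_insertion_sort([3, 1, 2, 0], 2, 1): A returns [0, 3, 1, 2], B returns [0, 1, 2, 3]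
import Mathlib
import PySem

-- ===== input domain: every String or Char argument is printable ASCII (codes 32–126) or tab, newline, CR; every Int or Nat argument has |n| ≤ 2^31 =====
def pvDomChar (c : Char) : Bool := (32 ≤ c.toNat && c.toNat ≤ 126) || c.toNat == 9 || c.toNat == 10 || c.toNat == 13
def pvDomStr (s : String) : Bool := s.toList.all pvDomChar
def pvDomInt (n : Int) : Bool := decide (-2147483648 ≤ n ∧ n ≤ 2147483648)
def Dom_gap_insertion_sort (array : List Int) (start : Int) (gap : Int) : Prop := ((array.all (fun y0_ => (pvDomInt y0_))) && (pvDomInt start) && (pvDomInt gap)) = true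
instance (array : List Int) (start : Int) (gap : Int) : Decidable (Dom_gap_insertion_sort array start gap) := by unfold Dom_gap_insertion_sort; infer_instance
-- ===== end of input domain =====

-- B replaces the in-place gapped insertion pass by gather/sort/scatter over the stride-`gap`
-- chain (both Pythons mutate `array` in place; the equivalence proved here is about the return value).

-- ===== PORT A =====
-- the inner `while position >= gap and array[position-gap] > current_val` loop;
-- fuel bounds the recursion (never exhausted inside Pre_, where gap ≥ 1 forces ≤ len(array) iterations)
def pvGapWhile (fuel : Nat) (arr : List Int) (current_val gap position : Int) : List Int × Int :=
  match fuel with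
  | 0 => (arr, position)
  | Nat.succ f =>
    if gap ≤ position ∧ current_val < PySem.List.pyGetD arr (position - gap) 0 then
      pvGapWhile f (PySem.List.pySetD arr position (PySem.List.pyGetD arr (position - gap) 0))
        current_val gap (position - gap)
    else (arr, position)

-- one iteration of the `for i in range(start+gap, len(array), gap)` body
def pvGapStep (gap : Int) (arr : List Int) (i : Int) : List Int :=
  let current_val := PySem.List.pyGetD arr i 0
  let p := pvGapWhile (arr.length + 1) arr current_val gap i
  PySem.List.pySetD p.1 p.2 current_val

def gap_insertion_sort (array : List Int) (start : Int) (gap : Int) : List Int :=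
  (PySem.List.pyRange (start + gap) (array.length : Int) gap).foldl (pvGapStep gap) array

-- ===== PORT B =====
def gap_insertion_sort_alt (array : List Int) (start : Int) (gap : Int) : List Int :=
  if gap > 0 then
    let idx := PySem.List.pyRange (PySem.Int.mod start gap) (array.length : Int) gap
    let vals := PySem.List.sorted (idx.map (fun j => PySem.List.pyGetD array j 0)) (fun v => v) false
    (idx.zip vals).foldl (fun a jv => PySem.List.pySetD a jv.1 jv.2) array
  else array

-- ===== PRECONDITION & SPEC =====
-- Pre_ excludes exactly the inputs where A raises: ValueError for gap = 0, and IndexError when the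
-- first loop index start+gap falls outside [-len(array), len(array)) on the side its step walks into.
def Pre_gap_insertion_sort (array : List Int) (start : Int) (gap : Int) : Prop :=
  (0 < gap ∧ -(array.length : Int) ≤ start + gap) ∨ (gap < 0 ∧ start + gap ≤ (array.length : Int))
instance (array : List Int) (start : Int) (gap : Int) : Decidable (Pre_gap_insertion_sort array start gap) := by
  unfold Pre_gap_insertion_sort; infer_instance

def pvWitness_gap_insertion_sort : List Int × Int × Int := ([3, 1, 2], 0, 1)

-- For gap > 0 and start ≥ gap, A's pass also relies on the chain entries at indices below start+gap
-- being already sorted; when that below-start prefix is unsorted A returns a chain that is still out of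
-- order, while B sorts the whole residue chain — the intended behaviour of a gapped sorting pass.
def D_gap_insertion_sort (array : List Int) (start : Int) (gap : Int) : Prop :=
  0 < gap ∧ gap ≤ start ∧
  ¬ ((PySem.List.pyRange (PySem.Int.mod start gap) (min (start + gap) (array.length : Int)) gap).map
      (fun j => PySem.List.pyGetD array j 0)).Pairwise (· ≤ ·)
instance (array : List Int) (start : Int) (gap : Int) : Decidable (D_gap_insertion_sort array start gap) := by
  unfold D_gap_insertion_sort; infer_instance

def Spec_gap_insertion_sort (array : List Int) (start : Int) (gap : Int) (out : List Int) : Prop :=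
  ¬ D_gap_insertion_sort array start gap → out = gap_insertion_sort_alt array start gap
instance (array : List Int) (start : Int) (gap : Int) (out : List Int) : Decidable (Spec_gap_insertion_sort array start gap out) := by
  unfold Spec_gap_insertion_sort; infer_instance

def pvDiffWitness_gap_insertion_sort : List Int × Int × Int := ([3, 1, 2, 0], 2, 1)
def pvDiffWitnessOut_gap_insertion_sort : (List Int) × (List Int) := ([0, 3, 1, 2], [0, 1, 2, 3])

-- ===== CLAIM (what is proved, stated in full; the proofs are below) =====
def Claim_unchanged_gap_insertion_sort : Prop := ∀ (array : List Int) (start : Int) (gap : Int), Dom_gap_insertion_sort array start gap → Pre_gap_insertion_sort array start gap → Spec_gap_insertion_sort array start gap (gap_insertion_sort array start gap)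
def Claim_changed_gap_insertion_sort : Prop := Dom_gap_insertion_sort (pvDiffWitness_gap_insertion_sort.1) (pvDiffWitness_gap_insertion_sort.2.1) (pvDiffWitness_gap_insertion_sort.2.2) ∧ Pre_gap_insertion_sort (pvDiffWitness_gap_insertion_sort.1) (pvDiffWitness_gap_insertion_sort.2.1) (pvDiffWitness_gap_insertion_sort.2.2) ∧ D_gap_insertion_sort (pvDiffWitness_gap_insertion_sort.1) (pvDiffWitness_gap_insertion_sort.2.1) (pvDiffWitness_gap_insertion_sort.2.2) ∧ gap_insertion_sort (pvDiffWitness_gap_insertion_sort.1) (pvDiffWitness_gap_insertion_sort.2.1) (pvDiffWitness_gap_insertion_sort.2.2) = pvDiffWitnessOut_gap_insertion_sort.1 ∧ gap_insertion_sort_alt (pvDiffWitness_gap_insertion_sort.1) (pvDiffWitness_gap_insertion_sort.2.1) (pvDiffWitness_gap_insertion_sort.2.2) = pvDiffWitnessOut_gap_insertion_sort.2 ∧ pvDiffWitnessOut_gap_insertion_sort.1 ≠ pvDiffWitnessOut_gap_insertion_sort.2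

def Claim_exact_gap_insertion_sort : Prop := ∀ (array : List Int) (start : Int) (gap : Int), Dom_gap_insertion_sort array start gap → Pre_gap_insertion_sort array start gap → D_gap_insertion_sort array start gap → gap_insertion_sort array start gap ≠ gap_insertion_sort_alt array start gap

-- ===== LEMMAS AND PROOFS =====

-- `pvW g p arr c` writes the values of c into arr at positions p, p+g, p+2g, …
def pvW (g : Nat) : Nat → List Int → List Int → List Int
  | _, arr, [] => arr
  | p, arr, v :: c => pvW g (p + g) (arr.set p v) c

theorem pvW_length (g : Nat) (c : List Int) : ∀ (p : Nat) (arr : List Int),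
    (pvW g p arr c).length = arr.length := by
  induction c with
  | nil => intro p arr; simp [pvW]
  | cons v c ih => intro p arr; simp [pvW, ih]

theorem pvW_getD_lo (g : Nat) (c : List Int) : ∀ (p : Nat) (arr : List Int) (j : Nat), j < p →
    (pvW g p arr c).getD j 0 = arr.getD j 0 := by
  induction c with
  | nil => intro p arr j _; simp [pvW]
  | cons v c ih =>
    intro p arr j hj
    have : j < p + g := by omega
    simp only [pvW]
    rw [ih (p + g) (arr.set p v) j this]
    simp [List.getD, List.getElem?_set_ne (by omega : p ≠ j)]

theorem pvW_getD_slot (g : Nat) (hg : 0 < g) (c : List Int) : ∀ (p : Nat) (arr : List Int) (t : Nat),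
    t < c.length → p + g * t < arr.length →
    (pvW g p arr c).getD (p + g * t) 0 = c.getD t 0 := by
  induction c with
  | nil => intro p arr t ht _; simp at ht
  | cons v c ih =>
    intro p arr t ht hlt
    cases t with
    | zero =>
      simp only [pvW, Nat.mul_zero, Nat.add_zero] at *
      rw [pvW_getD_lo g c (p + g) _ p (by omega)]
      simp [List.getD]
      rw [List.getElem?_set_self (by omega)]
      rfl
    | succ t =>
      have h1 : p + g * (t + 1) = (p + g) + g * t := by ring
      simp only [pvW, h1]
      rw [h1] at hlt
      rw [ih (p + g) (arr.set p v) t (by simpa using ht) (by simpa using hlt)]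
      rfl

theorem pvW_set_lo (g : Nat) (c : List Int) : ∀ (p : Nat) (arr : List Int) (q : Nat) (v : Int), q < p →
    pvW g p (arr.set q v) c = (pvW g p arr c).set q v := by
  induction c with
  | nil => intro p arr q v _; simp [pvW]
  | cons w c ih =>
    intro p arr q v hq
    simp only [pvW]
    rw [List.set_comm _ _ (by omega : q ≠ p), ih (p + g) _ q v (by omega)]

theorem pvW_set_slot (g : Nat) (_hg : 0 < g) (c : List Int) : ∀ (p : Nat) (arr : List Int) (t : Nat) (v : Int),
    t < c.length →
    pvW g p arr (c.set t v) = (pvW g p arr c).set (p + g * t) v := by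
  induction c with
  | nil => intro p arr t v ht; simp at ht
  | cons w c ih =>
    intro p arr t v ht
    cases t with
    | zero =>
      simp only [List.set_cons_zero, pvW, Nat.mul_zero, Nat.add_zero]
      rw [pvW_set_lo g c (p + g) arr p v (by omega),
        pvW_set_lo g c (p + g) arr p w (by omega), List.set_set]
    | succ t =>
      have h1 : p + g * (t + 1) = (p + g) + g * t := by ring
      simp only [List.set_cons_succ, pvW, h1]
      rw [ih (p + g) (arr.set p w) t v (by simpa using ht)]

theorem pvW_self (g : Nat) (c : List Int) : ∀ (p : Nat) (arr : List Int),
    (∀ t, t < c.length → p + g * t < arr.length ∧ c.getD t 0 = arr.getD (p + g * t) 0) →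
    pvW g p arr c = arr := by
  induction c with
  | nil => intro p arr _; simp [pvW]
  | cons v c ih =>
    intro p arr h
    have h0 := h 0 (by simp)
    simp only [Nat.mul_zero, Nat.add_zero] at h0
    have h02 : v = arr.getD p 0 := by simpa [List.getD] using h0.2
    have hset : arr.set p v = arr := by
      rw [h02, List.getD_eq_getElem _ _ h0.1]
      exact List.set_getElem_self h0.1
    simp only [pvW]
    rw [hset]
    apply ih
    intro t ht
    have h5 := h (t + 1) (by simpa using ht)
    have h3 : p + g * (t + 1) = (p + g) + g * t := by ring
    rw [h3] at h5
    simpa using h5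

-- right-to-left insertion into a (reversed) list: what the shifting while-loop computes
def pvInsRev (cur : Int) : List Int → List Int
  | [] => [cur]
  | a :: t => if cur < a then a :: pvInsRev cur t else cur :: a :: t

def pvInsR (s : List Int) (cur : Int) : List Int := (pvInsRev cur s.reverse).reverse

theorem pvInsRev_perm (cur : Int) (l : List Int) : (pvInsRev cur l).Perm (cur :: l) := by
  induction l with
  | nil => simp [pvInsRev]
  | cons a t ih =>
    simp only [pvInsRev]
    by_cases h : cur < a
    · simp only [if_pos h]
      exact (ih.cons a).trans (List.Perm.swap cur a t)
    · simp [if_neg h]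

theorem pvInsR_perm (s : List Int) (cur : Int) : (pvInsR s cur).Perm (cur :: s) := by
  unfold pvInsR
  refine ((List.reverse_perm _).trans (pvInsRev_perm cur s.reverse)).trans ?_
  exact (List.reverse_perm s).cons cur

theorem pvInsRev_pairwise (cur : Int) (l : List Int)
    (h : l.Pairwise (fun a b => b ≤ a)) : (pvInsRev cur l).Pairwise (fun a b => b ≤ a) := by
  induction l with
  | nil => simp [pvInsRev]
  | cons a t ih =>
    rw [List.pairwise_cons] at h
    simp only [pvInsRev]
    by_cases hc : cur < a
    · simp only [if_pos hc]
      rw [List.pairwise_cons]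
      refine ⟨fun x hx => ?_, ih h.2⟩
      have : x = cur ∨ x ∈ t := by
        have := (pvInsRev_perm cur t).mem_iff.mp hx
        simpa using this
      rcases this with rfl | hxt
      · omega
      · exact h.1 x hxt
    · simp only [if_neg hc]
      rw [List.pairwise_cons]
      refine ⟨fun x hx => ?_, by rw [List.pairwise_cons]; exact h⟩
      simp only [List.mem_cons] at hx
      rcases hx with rfl | hxt
      · omega
      · have := h.1 x hxt; omega

theorem pvInsR_pairwise (s : List Int) (cur : Int)
    (h : s.Pairwise (· ≤ ·)) : (pvInsR s cur).Pairwise (· ≤ ·) := by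
  unfold pvInsR
  have h' : s.reverse.Pairwise (fun a b => b ≤ a) := by
    rw [List.pairwise_reverse]; exact h
  rw [List.pairwise_reverse]
  exact pvInsRev_pairwise cur s.reverse h'

theorem pvInsRev_split (cur : Int) (l : List Int) :
    ∃ l1 l2, l = l1 ++ l2 ∧ pvInsRev cur l = l1 ++ cur :: l2 := by
  induction l with
  | nil => exact ⟨[], [], by simp, by simp [pvInsRev]⟩
  | cons a t ih =>
    by_cases hc : cur < a
    · obtain ⟨l1, l2, h1, h2⟩ := ih
      exact ⟨a :: l1, l2, by simp [h1], by simp [pvInsRev, if_pos hc, h2]⟩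
    · exact ⟨[], a :: t, by simp, by simp [pvInsRev, if_neg hc]⟩

theorem pvInsR_split (s : List Int) (cur : Int) :
    ∃ u v, s = u ++ v ∧ pvInsR s cur = u ++ cur :: v := by
  obtain ⟨l1, l2, h1, h2⟩ := pvInsRev_split cur s.reverse
  refine ⟨l2.reverse, l1.reverse, ?_, ?_⟩
  · rw [← List.reverse_reverse s, h1, List.reverse_append]
  · unfold pvInsR
    rw [h2, List.reverse_append, List.reverse_cons, List.append_assoc]
    simp

theorem pvInsR_not_pairwise (s : List Int) (cur : Int)
    (h : ¬ s.Pairwise (· ≤ ·)) : ¬ (pvInsR s cur).Pairwise (· ≤ ·) := by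
  obtain ⟨u, v, h1, h2⟩ := pvInsR_split s cur
  intro hp
  apply h
  rw [h2] at hp
  rw [h1]
  exact hp.sublist (List.Sublist.append_left (List.sublist_cons_self cur v) u)

theorem pvW_inj (g : Nat) (hg : 0 < g) (r : Nat) (arr : List Int) (c1 c2 : List Int)
    (hl : c1.length = c2.length) (hb : ∀ t, t < c1.length → r + g * t < arr.length)
    (he : pvW g r arr c1 = pvW g r arr c2) : c1 = c2 := by
  apply List.ext_getElem hl
  intro t h1 h2
  have e1 := pvW_getD_slot g hg c1 r arr t h1 (hb t h1)
  have e2 := pvW_getD_slot g hg c2 r arr t h2 (hb t h1)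
  rw [he, e2] at e1
  rw [List.getD_eq_getElem _ _ h1, List.getD_eq_getElem _ _ h2] at e1
  exact e1.symm

theorem pvSet_get_id (xs : List Int) (i : Int) (h1 : -(xs.length : Int) ≤ i)
    (h2 : i < (xs.length : Int)) :
    PySem.List.pySetD xs i (PySem.List.pyGetD xs i 0) = xs := by
  simp only [PySem.List.pySetD, PySem.List.pyGetD, PySem.List.pyGet?, PySem.List.pySet?,
    PySem.List.pyIdx?]
  by_cases hp : 0 ≤ i
  · have hk : i.toNat < xs.length := by omega
    simp only [if_pos hp, if_pos (by exact_mod_cast h2)]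
    simp [List.getElem?_eq_getElem hk, List.set_getElem_self]
  · have hk : xs.length - (-i).toNat < xs.length := by omega
    simp only [if_neg hp, if_pos h1]
    simp [List.getElem?_eq_getElem hk, List.set_getElem_self]

theorem pvStep_id (gap : Int) (_hg : 0 < gap) (arr : List Int) (i : Int)
    (h1 : -(arr.length : Int) ≤ i) (h2 : i < gap) (h3 : i < (arr.length : Int)) :
    pvGapStep gap arr i = arr := by
  have hcond : ¬ (gap ≤ i) := by omega
  simp only [pvGapStep, pvGapWhile]
  rw [if_neg (fun hc => hcond hc.1)]
  exact pvSet_get_id arr i h1 h3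

theorem pvSetD_slot (arr : List Int) (k : Nat) (v : Int) :
    PySem.List.pySetD arr ((k : Nat) : Int) v = arr.set k v := by
  simp

theorem pvSet_append_len (s : List Int) (x a : Int) : ∀ (rest : List Int),
    (s ++ x :: rest).set s.length a = s ++ a :: rest := by
  induction s with
  | nil => intro rest; simp
  | cons w s ih => intro rest; simp [ih]

theorem pvGetD_append_len (s : List Int) (x : Int) (rest : List Int) :
    (s ++ x :: rest).getD s.length 0 = x := by
  rw [List.getD_append_right _ _ _ _ (le_refl _)]
  simp

-- the while-loop, started at chain slot |s| over an array whose chain reads s ++ x :: rest,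
-- followed by the final write of cur, performs one right-to-left insertion of cur into s
theorem pvWhile_sim (arr0 : List Int) (r g : Nat) (hg : 0 < g) (hr : r < g)
    (gap : Int) (hgap : gap = (g : Int)) (rs : List Int) : ∀ (x : Int) (rest : List Int) (cur : Int) (fuel : Nat),
    rs.length + 1 ≤ fuel →
    r + g * rs.length < arr0.length →
    (PySem.List.pySetD
        (pvGapWhile fuel (pvW g r arr0 (rs.reverse ++ x :: rest)) cur gap ((r + g * rs.length : Nat) : Int)).1
        (pvGapWhile fuel (pvW g r arr0 (rs.reverse ++ x :: rest)) cur gap ((r + g * rs.length : Nat) : Int)).2 cur)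
      = pvW g r arr0 (pvInsR rs.reverse cur ++ rest) := by
  induction rs with
  | nil =>
    intro x rest cur fuel hfuel hlen
    match fuel, hfuel with
    | Nat.succ f, _ =>
      simp only [List.length_nil, Nat.mul_zero, Nat.add_zero, List.reverse_nil, List.nil_append,
        pvGapWhile]
      rw [if_neg (by push_cast [hgap]; omega : ¬ (gap ≤ ((r : Nat) : Int) ∧ _))]
      rw [pvSetD_slot]
      have h0 : (0 : Nat) < (x :: rest).length := by simp
      have := pvW_set_slot g hg (x :: rest) r arr0 0 cur h0
      simp only [Nat.mul_zero, Nat.add_zero] at this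
      rw [← this]
      simp [pvInsR, pvInsRev]
  | cons a rs ih =>
    intro x rest cur fuel hfuel hlen
    match fuel, hfuel with
    | Nat.succ f, hfuel =>
      simp only [List.length_cons] at hfuel hlen ⊢
      have hgm : g * (rs.length + 1) = g * rs.length + g := by ring
      have hslot' : r + g * rs.length < arr0.length := by omega
      have hrev : (a :: rs).reverse = rs.reverse ++ [a] := by simp
      have hidx : ((r + g * (rs.length + 1) : Nat) : Int) - gap
          = ((r + g * rs.length : Nat) : Int) := by
        push_cast [hgap]; ring
      have hlistlen : rs.length < (rs.reverse ++ [a] ++ x :: rest).length := by simp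
      have hread : PySem.List.pyGetD (pvW g r arr0 (rs.reverse ++ [a] ++ x :: rest))
          (((r + g * rs.length : Nat) : Int)) 0 = a := by
        rw [PySem.List.pyGetD_natCast]
        rw [pvW_getD_slot g hg _ r arr0 rs.length (by simp) (by omega)]
        rw [List.append_assoc]
        rw [List.getD_append_right _ _ _ _ (by simp)]
        simp
      have hcondle : gap ≤ ((r + g * (rs.length + 1) : Nat) : Int) := by
        rw [hgap]
        exact_mod_cast (by omega : g ≤ r + g * (rs.length + 1))
      have hsl : (rs.reverse ++ [a]).length = rs.length + 1 := by simp
      rw [hrev]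
      simp only [pvGapWhile]
      rw [hidx, hread]
      by_cases hc : cur < a
      · rw [if_pos ⟨hcondle, hc⟩]
        have hset : PySem.List.pySetD (pvW g r arr0 (rs.reverse ++ [a] ++ x :: rest))
            ((r + g * (rs.length + 1) : Nat) : Int) a
            = pvW g r arr0 (rs.reverse ++ a :: (a :: rest)) := by
          rw [pvSetD_slot, ← pvW_set_slot g hg _ r arr0 (rs.length + 1) a (by simp)]
          congr 1
          rw [← hsl, pvSet_append_len]
          simp
        rw [hset]
        have hih := ih a (a :: rest) cur f (by omega) hslot'
        rw [hih]
        congr 1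
        have h1 : pvInsR (rs.reverse ++ [a]) cur = pvInsR rs.reverse cur ++ [a] := by
          unfold pvInsR
          rw [List.reverse_append]
          simp only [List.reverse_cons, List.reverse_nil, List.nil_append, List.reverse_reverse,
            List.singleton_append]
          simp [pvInsRev, if_pos hc]
        rw [h1]
        simp
      · rw [if_neg (fun hcc => hc hcc.2)]
        rw [pvSetD_slot, ← pvW_set_slot g hg _ r arr0 (rs.length + 1) cur (by simp)]
        congr 1
        rw [← hsl, pvSet_append_len]
        have h1 : pvInsR (rs.reverse ++ [a]) cur = (rs.reverse ++ [a]) ++ [cur] := by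
          unfold pvInsR
          rw [List.reverse_append]
          simp only [List.reverse_cons, List.reverse_nil, List.nil_append, List.reverse_reverse,
            List.singleton_append]
          simp [pvInsRev, if_neg hc]
        rw [h1]
        simp

-- range facts for a general positive step
theorem pvRange_pos_len (a b s : Int) (hs : 0 < s) :
    (PySem.List.pyRange a b s).length = if a < b then ((b - a + s - 1) / s).toNat else 0 := by
  rw [PySem.List.pyRange_of_pos a b hs]; simp

theorem pvRange_pos_nil (a b s : Int) (hs : 0 < s) (h : b ≤ a) : PySem.List.pyRange a b s = [] := by
  rw [PySem.List.pyRange_of_pos a b hs]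
  simp [if_neg (not_lt.mpr h)]

theorem pvRange_pos_cons (a b s : Int) (hs : 0 < s) (h : a < b) :
    PySem.List.pyRange a b s = a :: PySem.List.pyRange (a + s) b s := by
  rw [PySem.List.pyRange_of_pos a b hs, PySem.List.pyRange_of_pos (a + s) b hs]
  have key : ((b - a + s - 1) / s).toNat
      = (if a + s < b then ((b - (a + s) + s - 1) / s).toNat else 0) + 1 := by
    by_cases h2 : a + s < b
    · rw [if_pos h2]
      have hnum : b - a + s - 1 = (b - (a + s) + s - 1) + 1 * s := by ring
      rw [hnum, Int.add_mul_ediv_right _ _ (by omega : s ≠ 0)]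
      have hpos : 0 ≤ (b - (a + s) + s - 1) / s :=
        Int.ediv_nonneg (by omega) (by omega)
      omega
    · rw [if_neg h2]
      have hlow : 1 ≤ (b - a + s - 1) / s := by
        rw [Int.le_ediv_iff_mul_le hs]; omega
      have hhigh : (b - a + s - 1) / s < 2 := by
        rw [Int.ediv_lt_iff_lt_mul hs]; omega
      omega
  rw [if_pos h, key, List.range_succ_eq_map, List.map_cons, List.map_map]
  congr 1
  · push_cast; ring
  · apply List.map_congr_left
    intro k _
    simp [Function.comp]
    ring

theorem pvRange_lt_iff (a b s : Int) (hs : 0 < s) (t : Nat) :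
    t < (PySem.List.pyRange a b s).length ↔ a + s * t < b := by
  rw [pvRange_pos_len a b s hs]
  by_cases h : a < b
  · rw [if_pos h]
    constructor
    · intro ht
      have h1 : ((t : Int) + 1) ≤ (b - a + s - 1) / s := by omega
      have h2 := (Int.le_ediv_iff_mul_le hs).mp h1
      nlinarith
    · intro hlt
      have h2 : ((t : Int) + 1) * s ≤ b - a + s - 1 := by nlinarith
      have := (Int.le_ediv_iff_mul_le hs).mpr h2
      omega
  · rw [if_neg h]
    constructor
    · omega
    · intro hlt
      exfalso
      have : (0 : Int) ≤ s * t := by positivity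
      omega

theorem pvRange_getElem (a b s : Int) (hs : 0 < s) (t : Nat)
    (ht : t < (PySem.List.pyRange a b s).length) :
    (PySem.List.pyRange a b s)[t] = a + s * t := by
  rw [List.getElem_of_eq (PySem.List.pyRange_of_pos a b hs)]
  simp only [List.getElem_map, List.getElem_range]

-- the chain of values at indices r, r+gap, r+2·gap, …  (exactly B's gathered list)
def pvChain (array : List Int) (r gap : Int) : List Int :=
  (PySem.List.pyRange r (array.length : Int) gap).map (fun j => PySem.List.pyGetD array j 0)

theorem pvChain_lt_iff (array : List Int) (r : Nat) (gap : Int) (hs : 0 < gap) (t : Nat) :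
    t < (pvChain array (r : Int) gap).length ↔ (r : Int) + gap * t < (array.length : Int) := by
  unfold pvChain
  rw [List.length_map]
  exact pvRange_lt_iff _ _ _ hs t

theorem pvChain_getD (array : List Int) (r g : Nat) (gap : Int) (hgap : gap = (g : Int))
    (hs : 0 < gap) (t : Nat) (ht : t < (pvChain array (r : Int) gap).length) :
    (pvChain array (r : Int) gap).getD t 0 = array.getD (r + g * t) 0 := by
  unfold pvChain at ht ⊢
  rw [List.length_map] at ht
  rw [List.getD_eq_getElem _ _ (by simpa using ht), List.getElem_map,
    pvRange_getElem _ _ _ hs t ht]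
  have : (r : Int) + gap * t = (((r + g * t : Nat)) : Int) := by push_cast [hgap]; ring
  rw [this, PySem.List.pyGetD_natCast]

-- the working part of the for-loop: insertion of the chain elements from slot m on;
-- sortedness of the accumulated prefix (and its failure) is carried through every step
theorem pvWork (arr0 : List Int) (r g : Nat) (hg : 0 < g) (hr : r < g)
    (gap : Int) (hgap : gap = (g : Int)) (w : Nat) : ∀ (m : Nat) (s : List Int),
    (pvChain arr0 (r : Int) gap).length ≤ m + w →
    s.Perm ((pvChain arr0 (r : Int) gap).take m) →
    ∃ s', s'.Perm (pvChain arr0 (r : Int) gap) ∧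
      (s.Pairwise (· ≤ ·) → s'.Pairwise (· ≤ ·)) ∧
      (¬ s.Pairwise (· ≤ ·) → ¬ s'.Pairwise (· ≤ ·)) ∧
      (PySem.List.pyRange ((r : Int) + gap * m) (arr0.length : Int) gap).foldl (pvGapStep gap)
          (pvW g r arr0 (s ++ (pvChain arr0 (r : Int) gap).drop m))
        = pvW g r arr0 s' := by
  have hgap0 : 0 < gap := by omega
  induction w with
  | zero =>
    intro m s hmw hperm
    have hdrop : (pvChain arr0 (r : Int) gap).drop m = [] := by
      apply List.drop_eq_nil_of_le; omega
    have htake : (pvChain arr0 (r : Int) gap).take m = pvChain arr0 (r : Int) gap := by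
      apply List.take_of_length_le; omega
    refine ⟨s, by rw [htake] at hperm; exact hperm, fun h => h, fun h => h, ?_⟩
    have : ¬ ((r : Int) + gap * m < (arr0.length : Int)) := by
      intro hlt
      have := (pvChain_lt_iff arr0 r gap hgap0 m).mpr hlt
      omega
    rw [pvRange_pos_nil _ _ _ hgap0 (by omega), hdrop, List.append_nil]
    simp
  | succ w ih =>
    intro m s hmw hperm
    by_cases hm : (r : Int) + gap * m < (arr0.length : Int)
    · have hmL : m < (pvChain arr0 (r : Int) gap).length :=
        (pvChain_lt_iff arr0 r gap hgap0 m).mpr hm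
      have hslen : s.length = m := by
        have := hperm.length_eq
        rw [List.length_take] at this
        omega
      -- peel one loop iteration
      rw [pvRange_pos_cons _ _ _ hgap0 hm, List.foldl_cons]
      set cur := (pvChain arr0 (r : Int) gap).getD m 0 with hcur
      have hdropm : (pvChain arr0 (r : Int) gap).drop m
          = cur :: (pvChain arr0 (r : Int) gap).drop (m + 1) := by
        rw [List.drop_eq_getElem_cons hmL, hcur, List.getD_eq_getElem _ _ hmL]
      have hcast : (r : Int) + gap * m = (((r + g * m : Nat)) : Int) := by
        push_cast [hgap]; ring
      have hslot : r + g * m < arr0.length := by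
        rw [hcast] at hm; exact_mod_cast hm
      have hstep : pvGapStep gap (pvW g r arr0 (s ++ (pvChain arr0 (r : Int) gap).drop m))
          ((r : Int) + gap * m)
          = pvW g r arr0 (pvInsR s cur ++ (pvChain arr0 (r : Int) gap).drop (m + 1)) := by
        simp only [pvGapStep]
        have hcurread : PySem.List.pyGetD (pvW g r arr0 (s ++ (pvChain arr0 (r : Int) gap).drop m))
            ((r : Int) + gap * m) 0 = cur := by
          rw [hcast, PySem.List.pyGetD_natCast]
          rw [pvW_getD_slot g hg _ r arr0 m (by rw [hdropm]; simp; omega) hslot]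
          rw [hdropm, ← hslen, pvGetD_append_len]
        rw [hcurread]
        have hfuel : s.reverse.length + 1 ≤ (pvW g r arr0 (s ++ (pvChain arr0 (r : Int) gap).drop m)).length + 1 := by
          rw [pvW_length, List.length_reverse, hslen]
          have hgm : (m : Int) ≤ (g : Int) * (m : Int) := by nlinarith [Int.natCast_nonneg m]
          have : (m : Int) < (arr0.length : Int) := by
            rw [hgap] at hm; omega
          omega
        have := pvWhile_sim arr0 r g hg hr gap hgap s.reverse cur
          ((pvChain arr0 (r : Int) gap).drop (m + 1)) cur
          ((pvW g r arr0 (s ++ (pvChain arr0 (r : Int) gap).drop m)).length + 1)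
          hfuel (by rw [List.length_reverse, hslen]; exact hslot)
        rw [List.reverse_reverse, List.length_reverse, hslen, ← hdropm, ← hcast] at this
        exact this
      rw [hstep]
      have hnext : (r : Int) + gap * m + gap = (r : Int) + gap * (m + 1 : Nat) := by
        push_cast; ring
      rw [hnext]
      have hperm' : (pvInsR s cur).Perm ((pvChain arr0 (r : Int) gap).take (m + 1)) := by
        have h1 : (pvInsR s cur).Perm (cur :: s) := pvInsR_perm s cur
        have h2 : (cur :: s).Perm (cur :: (pvChain arr0 (r : Int) gap).take m) := hperm.cons cur
        have h3 : ((pvChain arr0 (r : Int) gap).take m ++ [cur]).Perm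
            (cur :: (pvChain arr0 (r : Int) gap).take m) := List.perm_append_singleton _ _
        have h4 : (pvChain arr0 (r : Int) gap).take (m + 1)
            = (pvChain arr0 (r : Int) gap).take m ++ [cur] := by
          rw [List.take_add_one, List.getElem?_eq_getElem hmL]
          rw [hcur, List.getD_eq_getElem _ _ hmL]
          rfl
        rw [h4]
        exact (h1.trans h2).trans h3.symm
      obtain ⟨s', hp1, hp2, hp3, hp4⟩ := ih (m + 1) (pvInsR s cur) (by omega) hperm'
      exact ⟨s', hp1,
        fun h => hp2 (pvInsR_pairwise s cur h),
        fun h => hp3 (pvInsR_not_pairwise s cur h), hp4⟩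
    · -- loop already finished
      have hled : (pvChain arr0 (r : Int) gap).length ≤ m := by
        by_contra hcon
        exact hm ((pvChain_lt_iff arr0 r gap hgap0 m).mp (by omega))
      have htake : (pvChain arr0 (r : Int) gap).take m = pvChain arr0 (r : Int) gap :=
        List.take_of_length_le hled
      have hdrop : (pvChain arr0 (r : Int) gap).drop m = [] :=
        List.drop_eq_nil_of_le hled
      refine ⟨s, by rw [htake] at hperm; exact hperm, fun h => h, fun h => h, ?_⟩
      rw [pvRange_pos_nil _ _ _ hgap0 (by omega), hdrop, List.append_nil]
      simp

-- peeling the no-op iterations at indices ≤ r (they write an element back to its own slot)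
theorem pvJunk_last (arr0 : List Int) (r g : Nat) (hg : 0 < g) (hr : r < g)
    (gap : Int) (hgap : gap = (g : Int)) :
    (PySem.List.pyRange (r : Int) (arr0.length : Int) gap).foldl (pvGapStep gap) arr0
      = (PySem.List.pyRange ((r : Int) + gap) (arr0.length : Int) gap).foldl (pvGapStep gap) arr0 := by
  have hgap0 : 0 < gap := by omega
  by_cases h : (r : Int) < (arr0.length : Int)
  · rw [pvRange_pos_cons _ _ _ hgap0 h, List.foldl_cons]
    rw [pvStep_id gap hgap0 arr0 (r : Int) (by omega) (by omega) h]
  · rw [pvRange_pos_nil _ _ _ hgap0 (by omega), pvRange_pos_nil _ _ _ hgap0 (by omega)]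

theorem pvJunk (arr0 : List Int) (r g : Nat) (hg : 0 < g) (hr : r < g)
    (gap : Int) (hgap : gap = (g : Int)) (d : Nat) : ∀ (i : Int),
    -(arr0.length : Int) ≤ i → i ≤ (r : Int) → gap ∣ (r : Int) - i →
    ((r : Int) - i).toNat ≤ d →
    (PySem.List.pyRange i (arr0.length : Int) gap).foldl (pvGapStep gap) arr0
      = (PySem.List.pyRange ((r : Int) + gap) (arr0.length : Int) gap).foldl (pvGapStep gap) arr0 := by
  have hgap0 : 0 < gap := by omega
  induction d with
  | zero =>
    intro i h1 h2 hdvd hd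
    have : i = (r : Int) := by omega
    rw [this]
    exact pvJunk_last arr0 r g hg hr gap hgap
  | succ d ih =>
    intro i h1 h2 hdvd hd
    by_cases heq : i = (r : Int)
    · rw [heq]; exact pvJunk_last arr0 r g hg hr gap hgap
    · have hlt : i < (r : Int) := by omega
      have hstep : i + gap ≤ (r : Int) := by
        rcases hdvd with ⟨k, hk⟩
        have hk1 : 1 ≤ k := by nlinarith
        nlinarith
      have hineg : i < 0 := by omega
      have hin : i < (arr0.length : Int) := by omega
      rw [pvRange_pos_cons _ _ _ hgap0 (by omega), List.foldl_cons]
      rw [pvStep_id gap hgap0 arr0 i h1 (by omega) (by omega)]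
      apply ih (i + gap) (by omega) hstep ?_ (by omega)
      rcases hdvd with ⟨k, hk⟩
      exact ⟨k - 1, by linarith [hk]⟩

-- B's zip/scatter fold is the chain writer
theorem pvScatter (g : Nat) (vals : List Int) : ∀ (p : Nat) (arr : List Int),
    ((((List.range vals.length).map (fun t => ((p + g * t : Nat) : Int))).zip vals).foldl
        (fun a jv => PySem.List.pySetD a jv.1 jv.2) arr)
      = pvW g p arr vals := by
  induction vals with
  | nil => intro p arr; simp [pvW]
  | cons v vs ih =>
    intro p arr
    rw [List.length_cons, List.range_succ_eq_map, List.map_cons, List.map_map]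
    have hfun : (List.range vs.length).map ((fun t => ((p + g * t : Nat) : Int)) ∘ Nat.succ)
        = (List.range vs.length).map (fun t => (((p + g) + g * t : Nat) : Int)) := by
      apply List.map_congr_left
      intro k _
      simp [Function.comp]
      ring
    rw [hfun]
    simp only [List.zip_cons_cons, List.foldl_cons, pvW]
    rw [pvSetD_slot]
    rw [show (p + g * 0 : Nat) = p by ring] at *
    exact ih (p + g) (arr.set p v)

-- the two easy total cases
theorem pvNegGap (array : List Int) (start gap : Int) (hg : gap < 0)
    (hpre : start + gap ≤ (array.length : Int)) :
    gap_insertion_sort array start gap = gap_insertion_sort_alt array start gap := by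
  unfold gap_insertion_sort gap_insertion_sort_alt
  rw [if_neg (by omega : ¬ gap > 0)]
  have : PySem.List.pyRange (start + gap) (array.length : Int) gap = [] := by
    unfold PySem.List.pyRange
    rw [if_neg (by omega : ¬ gap = 0)]
    simp only
    rw [if_neg (by omega : ¬ 0 < gap), if_neg (by omega : ¬ (array.length : Int) < start + gap)]
    simp
  rw [this]
  simp

theorem pvNatEq (x y : Nat) (h : ∀ t, t < x ↔ t < y) : x = y := by
  have h1 := h x
  have h2 := h y
  omega

theorem pvTake1_pairwise (l : List Int) : (l.take 1).Pairwise (· ≤ ·) := by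
  cases l <;> simp

-- the list D_ constrains: the chain entries at indices below start+gap
def pvPrefix (array : List Int) (start gap : Int) : List Int :=
  (PySem.List.pyRange (PySem.Int.mod start gap) (min (start + gap) (array.length : Int)) gap).map
    (fun j => PySem.List.pyGetD array j 0)

-- for gap > 0 inside Pre_ both ports write a permutation of the chain back onto the chain
-- slots: A the insertion result (sorted exactly when the D_-prefix is), B the sorted chain
theorem pvReduce (array : List Int) (start gap : Int) (hg : 0 < gap)
    (hpre : -(array.length : Int) ≤ start + gap) :
    ∃ (gn rn : Nat) (s' : List Int),
      0 < gn ∧ gap = (gn : Int) ∧ rn < gn ∧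
      s'.Perm (pvChain array (rn : Int) gap) ∧
      gap_insertion_sort array start gap = pvW gn rn array s' ∧
      gap_insertion_sort_alt array start gap
        = pvW gn rn array (PySem.List.sorted (pvChain array (rn : Int) gap) (fun v => v) false) ∧
      (start < gap → s'.Pairwise (· ≤ ·)) ∧
      (gap ≤ start →
        ((pvPrefix array start gap).Pairwise (· ≤ ·) → s'.Pairwise (· ≤ ·)) ∧
        (¬ (pvPrefix array start gap).Pairwise (· ≤ ·) → ¬ s'.Pairwise (· ≤ ·))) := by
  have hgn : 0 < gap.toNat := by omega
  have hgap : gap = (gap.toNat : Int) := by omega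
  have hr0 : 0 ≤ PySem.Int.mod start gap := PySem.Int.mod_nonneg start hg
  have hrg : PySem.Int.mod start gap < gap := PySem.Int.mod_lt start hg
  obtain ⟨rn, hrn⟩ : ∃ rn : Nat, (rn : Int) = PySem.Int.mod start gap :=
    ⟨(PySem.Int.mod start gap).toNat, by omega⟩
  have hq := PySem.Int.floordiv_mul_add_mod start gap
  have hrlt : rn < gap.toNat := by omega
  -- B reduces to writing the sorted chain back onto the chain slots
  have hB : gap_insertion_sort_alt array start gap
      = pvW gap.toNat rn array
          (PySem.List.sorted (pvChain array (rn : Int) gap) (fun v => v) false) := by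
    unfold gap_insertion_sort_alt
    rw [if_pos hg, ← hrn]
    show ((PySem.List.pyRange ((rn : Int)) (array.length : Int) gap).zip
        (PySem.List.sorted (pvChain array (rn : Int) gap) (fun v => v) false)).foldl
        (fun a jv => PySem.List.pySetD a jv.1 jv.2) array
      = pvW gap.toNat rn array (PySem.List.sorted (pvChain array (rn : Int) gap) (fun v => v) false)
    have hlen : (PySem.List.sorted (pvChain array (rn : Int) gap) (fun v => v) false).length
        = (PySem.List.pyRange ((rn : Int)) (array.length : Int) gap).length := by
      rw [PySem.List.length_sorted]
      unfold pvChain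
      rw [List.length_map]
    have hidx : PySem.List.pyRange ((rn : Int)) (array.length : Int) gap
        = (List.range (PySem.List.sorted (pvChain array (rn : Int) gap) (fun v => v) false).length).map
            (fun t => ((rn + gap.toNat * t : Nat) : Int)) := by
      apply List.ext_getElem
      · simp [hlen]
      · intro t h1 h2
        rw [pvRange_getElem _ _ _ hg t h1]
        simp only [List.getElem_map, List.getElem_range]
        push_cast
        rw [← hgap]
    conv_lhs => rw [hidx]
    rw [pvScatter]
  -- the chain reads back the original array on the chain slots
  have hchainP : ∀ t : Nat, t < (pvChain array ((rn : Int)) gap).length →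
      rn + gap.toNat * t < array.length ∧
      (pvChain array (rn : Int) gap).getD t 0 = array.getD (rn + gap.toNat * t) 0 := by
    intro t ht
    refine ⟨?_, pvChain_getD array rn gap.toNat gap hgap hg t ht⟩
    have h2 := (pvChain_lt_iff array rn gap hg t).mp ht
    rw [hgap] at h2
    exact_mod_cast h2
  have hself : pvW gap.toNat rn array (pvChain array (rn : Int) gap) = array :=
    pvW_self _ _ _ _ hchainP
  -- the working loop from any slot
  have happly : ∀ m : Nat,
      ∃ s', s'.Perm (pvChain array (rn : Int) gap) ∧
        (((pvChain array (rn : Int) gap).take m).Pairwise (· ≤ ·) → s'.Pairwise (· ≤ ·)) ∧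
        (¬ ((pvChain array (rn : Int) gap).take m).Pairwise (· ≤ ·) → ¬ s'.Pairwise (· ≤ ·)) ∧
        (PySem.List.pyRange ((rn : Int) + gap * m) (array.length : Int) gap).foldl
            (pvGapStep gap) array = pvW gap.toNat rn array s' := by
    intro m
    obtain ⟨s', h1, h2, h3, h4⟩ := pvWork array rn gap.toNat hgn hrlt gap hgap
      (pvChain array (rn : Int) gap).length m ((pvChain array (rn : Int) gap).take m)
      (by omega) (List.Perm.refl _)
    rw [List.take_append_drop, hself] at h4
    exact ⟨s', h1, h2, h3, h4⟩
  by_cases hcase : start < gap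
  · -- the chain prefix ahead of the loop is a single element
    have hone : (rn : Int) + gap * ((1 : Nat) : Int) = (rn : Int) + gap := by push_cast; ring
    obtain ⟨s', h1, h2, h3, h4⟩ := happly 1
    have hA : gap_insertion_sort array start gap = pvW gap.toNat rn array s' := by
      unfold gap_insertion_sort
      rw [← h4, hone]
      by_cases h0 : 0 ≤ start
      · have hr_eq : PySem.Int.mod start gap = start := by
          rw [PySem.Int.mod_eq_emod_of_pos hg]
          exact Int.emod_eq_of_lt h0 hcase
        have : start + gap = (rn : Int) + gap := by omega
        rw [this]
      · -- negative start: the loop first walks no-op indices up to the residue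
        have hqneg : PySem.Int.floordiv start gap ≤ -1 := by nlinarith
        have hle : start + gap ≤ (rn : Int) := by nlinarith
        have hdvd : gap ∣ (rn : Int) - (start + gap) :=
          ⟨-(PySem.Int.floordiv start gap + 1), by rw [hrn]; linear_combination hq⟩
        exact pvJunk array rn gap.toNat hgn hrlt gap hgap ((rn : Int) - (start + gap)).toNat
          (start + gap) hpre hle hdvd (by omega)
    exact ⟨gap.toNat, rn, s', hgn, hgap, hrlt, h1, hA, hB,
      fun _ => h2 (pvTake1_pairwise _), fun hge => absurd hge (by omega)⟩
  · -- start ≥ gap: the loop starts after the D_ prefix, the first m0 chain elements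
    have hq1 : 1 ≤ PySem.Int.floordiv start gap := by nlinarith
    obtain ⟨m0, hm0⟩ : ∃ m0 : Nat, (m0 : Int) = PySem.Int.floordiv start gap + 1 :=
      ⟨(PySem.Int.floordiv start gap + 1).toNat, by omega⟩
    have hsg : start + gap = (rn : Int) + gap * (m0 : Int) := by
      have hring : gap * (PySem.Int.floordiv start gap + 1)
          = PySem.Int.floordiv start gap * gap + gap := by ring
      have hm0' : gap * (m0 : Int) = gap * (PySem.Int.floordiv start gap + 1) := by rw [hm0]
      omega
    have hpr : PySem.List.pyRange (rn : Int) (min (start + gap) (array.length : Int)) gap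
        = (PySem.List.pyRange (rn : Int) (array.length : Int) gap).take m0 := by
      apply List.ext_getElem
      · rw [List.length_take]
        apply pvNatEq
        intro t
        rw [pvRange_lt_iff _ _ _ hg t, lt_min_iff, Nat.lt_min]
        have hiff : ((rn : Int) + gap * t < start + gap) ↔ t < m0 := by
          rw [hsg]
          constructor
          · intro hlt
            have h5 : gap * (t : Int) < gap * (m0 : Int) := by omega
            have h6 : (t : Int) < (m0 : Int) := lt_of_mul_lt_mul_left h5 (by omega)
            exact_mod_cast h6
          · intro hlt
            have : gap * (t : Int) < gap * (m0 : Int) :=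
              Int.mul_lt_mul_of_pos_left (by exact_mod_cast hlt) hg
            omega
        have hiff2 := pvRange_lt_iff (rn : Int) (array.length : Int) gap hg t
        constructor
        · rintro ⟨ht1, ht2⟩
          exact ⟨hiff.mp ht1, hiff2.mpr ht2⟩
        · rintro ⟨ht1, ht2⟩
          exact ⟨hiff.mpr ht1, hiff2.mp ht2⟩
      · intro t h1 h2
        rw [pvRange_getElem _ _ _ hg t h1, List.getElem_take,
          pvRange_getElem _ _ _ hg t (by simp at h2; omega)]
    have hprefix : pvPrefix array start gap = (pvChain array (rn : Int) gap).take m0 := by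
      unfold pvPrefix pvChain
      rw [← hrn, hpr, ← List.map_take]
    obtain ⟨s', h1, h2, h3, h4⟩ := happly m0
    have hA : gap_insertion_sort array start gap = pvW gap.toNat rn array s' := by
      unfold gap_insertion_sort
      rw [← h4, hsg]
    refine ⟨gap.toNat, rn, s', hgn, hgap, hrlt, h1, hA, hB,
      fun hlt => absurd hlt (by omega), fun _ => ⟨?_, ?_⟩⟩
    · rw [hprefix]; exact h2
    · rw [hprefix]; exact h3

-- main equivalence for gap > 0 outside D_
theorem pvMain_pos (array : List Int) (start gap : Int) (hg : 0 < gap)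
    (hpre : -(array.length : Int) ≤ start + gap)
    (hnd : ¬ D_gap_insertion_sort array start gap) :
    gap_insertion_sort array start gap = gap_insertion_sort_alt array start gap := by
  obtain ⟨gn, rn, s', hgn, hgap, hrlt, hperm, hA, hB, himp1, himp2⟩ :=
    pvReduce array start gap hg hpre
  have hpair : s'.Pairwise (· ≤ ·) := by
    by_cases hcase : start < gap
    · exact himp1 hcase
    · refine (himp2 (by omega)).1 ?_
      by_contra hcon
      exact hnd ⟨hg, by omega, hcon⟩
  have hsorted : PySem.List.sorted (pvChain array (rn : Int) gap) (fun x => x) false = s' :=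
    PySem.List.sorted_id_eq_of_perm_of_pairwise _ _ hperm hpair
  rw [hA, hB, hsorted]

-- inside D_ the two ports really differ: A's chain keeps an inversion, B's is sorted
theorem pvTight (array : List Int) (start gap : Int)
    (hpre : Pre_gap_insertion_sort array start gap)
    (hD : D_gap_insertion_sort array start gap) :
    gap_insertion_sort array start gap ≠ gap_insertion_sort_alt array start gap := by
  obtain ⟨hg, hge, hnp⟩ := hD
  have hpre' : -(array.length : Int) ≤ start + gap := by
    rcases hpre with ⟨_, h⟩ | ⟨h, _⟩ <;> omega
  obtain ⟨gn, rn, s', hgn, hgap, hrlt, hperm, hA, hB, _, himp2⟩ :=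
    pvReduce array start gap hg hpre'
  have hnspair : ¬ s'.Pairwise (· ≤ ·) := (himp2 hge).2 hnp
  intro heq
  apply hnspair
  rw [hA, hB] at heq
  have hl : s'.length
      = (PySem.List.sorted (pvChain array (rn : Int) gap) (fun v => v) false).length := by
    rw [PySem.List.length_sorted, hperm.length_eq]
  have hb : ∀ t, t < s'.length → rn + gn * t < array.length := by
    intro t ht
    rw [hperm.length_eq] at ht
    have h2 := (pvChain_lt_iff array rn gap hg t).mp ht
    rw [hgap] at h2
    exact_mod_cast h2
  have hs' := pvW_inj gn hgn rn array s' _ hl hb heq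
  rw [hs']
  have := PySem.List.sorted_pairwise (pvChain array (rn : Int) gap) (fun v => v)
  simpa using this

-- ===== VERDICT (by name: the statement is the Claim_ definition above) =====
theorem gap_insertion_sort_spec : Claim_unchanged_gap_insertion_sort := by
  intro array start gap _ hpre
  unfold Spec_gap_insertion_sort
  intro hnd
  rcases hpre with ⟨hg, hb⟩ | ⟨hg, hb⟩
  · exact (pvMain_pos array start gap hg hb hnd).symm ▸ rfl
  · exact pvNegGap array start gap hg hb

theorem gap_insertion_sort_changed : Claim_changed_gap_insertion_sort := by
  unfold Claim_changed_gap_insertion_sort; decide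

theorem gap_insertion_sort_tight : Claim_exact_gap_insertion_sort := by
  intro array start gap _ hpre hD
  exact pvTight array start gap hpre hD
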